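-- pv_equiv track=rewrite | github.com/wnismiddle/named_entity_recognition | app/utils/utility.py | clear_single_tag_sent
-- ===== SOURCE A (Python) =====
-- def clear_single_tag_sent(tag):
--     if len(tag) == 0:
--         return []
--
--     elif len(tag) == 1:
--         return ['O']
--
--     else:
--         if tag[0] != 'O' and tag[1] == 'O':
--             tag[0] = 'O'
--         if tag[-1] != 'O' and tag[-2] == 'O':
--             tag[-1] = 'O'
--
--         for i in range(1, len(tag) - 1):
--             if tag[i] != 'O' and tag[i - 1] == 'O' and tag[i + 1] == 'O':
--                 tag[i] = 'O'
--
--         return tag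
-- ===== SOURCE B (Python) =====
-- def clear_single_tag_sent(tag):
--     if len(tag) == 0:
--         return []
--     if len(tag) == 1:
--         return ['O']
--     # Run-length decomposition: walk maximal runs of equal O-ness; an isolated
--     # tag is exactly a length-1 non-O run, which is rewritten to a single 'O'.
--     out = []
--     i = 0
--     n = len(tag)
--     while i < n:
--         j = i + 1
--         while j < n and (tag[j] == 'O') == (tag[i] == 'O'):
--             j += 1
--         if j - i == 1 and tag[i] != 'O':
--             out.append('O')
--         else:
--             out.extend(tag[i:j])
--         i = j
--     tag[:] = out
--     return tag
-- ===== Notes on version B (the rewrite author's own statement) =====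
-- stated objective: alternative
-- what changed: A's per-index neighbour tests (first/last guards plus an in-place interior index loop) are replaced by a run-length decomposition: the list is walked as maximal runs of equal O-ness and each length-1 non-O run (exactly an isolated tag) is rewritten to a single 'O' while longer runs are kept verbatim.
import Mathlib
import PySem

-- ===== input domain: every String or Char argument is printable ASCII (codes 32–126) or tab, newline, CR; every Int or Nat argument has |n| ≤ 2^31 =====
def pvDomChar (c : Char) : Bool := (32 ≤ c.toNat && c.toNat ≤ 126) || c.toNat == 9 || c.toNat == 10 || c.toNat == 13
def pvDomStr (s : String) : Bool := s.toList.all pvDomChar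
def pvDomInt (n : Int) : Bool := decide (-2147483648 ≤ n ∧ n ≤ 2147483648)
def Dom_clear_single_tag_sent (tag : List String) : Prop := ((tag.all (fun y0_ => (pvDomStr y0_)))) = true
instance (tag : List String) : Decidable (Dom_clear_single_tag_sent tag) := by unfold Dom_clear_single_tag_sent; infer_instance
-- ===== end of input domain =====

-- B replaces A's per-index neighbour tests by a recursive run-length decomposition (an isolated
-- tag = a length-1 non-O run); equivalence is about the return value (both Pythons mutate `tag`
-- in place to the same content).

-- ===== PORT A =====
-- tag[-1]/tag[-2] are indices (len-1)/(len-2), in range since len ≥ 2 in that branch (exact).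
def aGuard1 (tag : List String) : List String :=
  if tag.getD 0 "" ≠ "O" ∧ tag.getD 1 "" = "O" then tag.set 0 "O" else tag

def aGuard2 (t1 : List String) : List String :=
  if t1.getD (t1.length - 1) "" ≠ "O" ∧ t1.getD (t1.length - 2) "" = "O"
  then t1.set (t1.length - 1) "O" else t1

def clear_single_tag_sent (tag : List String) : List String :=
  if tag.length = 0 then []
  else if tag.length = 1 then ["O"]
  else
    (List.range' 1 (tag.length - 1 - 1)).foldl
      (fun t i =>
        if t.getD i "" ≠ "O" ∧ t.getD (i - 1) "" = "O" ∧ t.getD (i + 1) "" = "O"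
        then t.set i "O" else t) (aGuard2 (aGuard1 tag))

-- ===== PORT B =====
-- Source B's inner while loop: how far the current run of equal O-ness extends past its first element.
def countRun (key : Bool) : List String → Nat
  | [] => 0
  | y :: ys => if (y == "O") = key then 1 + countRun key ys else 0

-- Source B's outer while loop over runs, as structural recursion on the remaining suffix:
-- emit the fixed leading run, continue on the rest.
def fixSegs : List String → List String
  | [] => []
  | x :: rest =>
    let c := countRun (x == "O") rest
    (if c + 1 = 1 ∧ x ≠ "O" then ["O"] else x :: rest.take c) ++ fixSegs (rest.drop c)
  termination_by l => l.length
  decreasing_by simp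

def clear_single_tag_sent_alt (tag : List String) : List String :=
  if tag.length = 0 then []
  else if tag.length = 1 then ["O"]
  else fixSegs tag

-- ===== PRECONDITION & SPEC =====
def Spec_clear_single_tag_sent (tag : List String) (out : List String) : Prop := out = clear_single_tag_sent_alt tag
instance (tag : List String) (out : List String) : Decidable (Spec_clear_single_tag_sent tag out) := by unfold Spec_clear_single_tag_sent; infer_instance

-- ===== CLAIM (what is proved, stated in full; the proofs are below) =====
def Claim_equal_clear_single_tag_sent : Prop := ∀ (tag : List String), Dom_clear_single_tag_sent tag → Spec_clear_single_tag_sent tag (clear_single_tag_sent tag)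

-- ===== LEMMAS AND PROOFS =====

-- pointwise "snapshot" rule: clear an element iff it is non-O with O on both (padded) sides
def gRec (prev : String) : List String → List String
  | [] => []
  | x :: rest =>
      (if x ≠ "O" ∧ prev = "O" ∧ rest.getD 0 "O" = "O" then "O" else x) :: gRec x rest

theorem gRec_length (prev : String) (xs : List String) : (gRec prev xs).length = xs.length := by
  induction xs generalizing prev with
  | nil => rfl
  | cons x rest ih => simp [gRec, ih]

theorem getD_set (l : List String) (k j : Nat) (v d : String) :
    (l.set k v).getD j d = if k = j ∧ j < l.length then v else l.getD j d := by
  by_cases hj : j < l.length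
  · by_cases hk : k = j
    · subst hk
      rw [List.getD_eq_getElem _ _ (by simpa using hj), List.getElem_set, if_pos rfl,
        if_pos ⟨rfl, hj⟩]
    · rw [List.getD_eq_getElem _ _ (by simpa using hj), List.getElem_set, if_neg hk,
        if_neg (by tauto), List.getD_eq_getElem _ _ hj]
  · rw [List.getD_eq_default _ _ (by simpa using Nat.le_of_not_lt hj), if_neg (by tauto),
      List.getD_eq_default _ _ (Nat.le_of_not_lt hj)]

theorem getD_irrel (l : List String) (j : Nat) (d1 d2 : String) (h : j < l.length) :
    l.getD j d1 = l.getD j d2 := by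
  rw [List.getD_eq_getElem _ _ h, List.getD_eq_getElem _ _ h]

theorem length_aGuard1 (t : List String) : (aGuard1 t).length = t.length := by
  unfold aGuard1; split <;> simp

theorem length_aGuard2 (t : List String) : (aGuard2 t).length = t.length := by
  unfold aGuard2; split <;> simp

theorem getD_aGuard1_ne (t : List String) (j : Nat) (hj : j ≠ 0) :
    (aGuard1 t).getD j "" = t.getD j "" := by
  unfold aGuard1
  split
  · rw [getD_set, if_neg (by tauto)]
  · rfl

theorem getD_aGuard1_zero (t : List String) (h0 : 0 < t.length) :
    (aGuard1 t).getD 0 "" =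
      if t.getD 0 "" ≠ "O" ∧ t.getD 1 "" = "O" then "O" else t.getD 0 "" := by
  unfold aGuard1
  split
  · rw [getD_set, if_pos ⟨rfl, h0⟩]
  · rfl

theorem getD_aGuard2_ne (t : List String) (j : Nat) (hj : j ≠ t.length - 1) :
    (aGuard2 t).getD j "" = t.getD j "" := by
  unfold aGuard2
  split
  · rw [getD_set, if_neg (by tauto)]
  · rfl

theorem getD_aGuard2_last (t : List String) (h0 : 0 < t.length) :
    (aGuard2 t).getD (t.length - 1) "" =
      if t.getD (t.length - 1) "" ≠ "O" ∧ t.getD (t.length - 2) "" = "O"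
      then "O" else t.getD (t.length - 1) "" := by
  unfold aGuard2
  split
  · rw [getD_set, if_pos ⟨rfl, by omega⟩]
  · rfl

theorem getD_gRec (xs : List String) (prev : String) (j : Nat) (hj : j < xs.length) :
    (gRec prev xs).getD j "" =
      if xs.getD j "" ≠ "O" ∧ (if j = 0 then prev else xs.getD (j-1) "") = "O" ∧
          xs.getD (j+1) "O" = "O"
      then "O" else xs.getD j "" := by
  induction xs generalizing prev j with
  | nil => simp at hj
  | cons x rest ih =>
    cases j with
    | zero => cases rest <;> simp [gRec, List.getD]
    | succ j =>
      have hj' : j < rest.length := by simpa using hj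
      simp only [gRec, List.getD_cons_succ]
      rw [ih x j hj']
      cases j with
      | zero => simp [List.getD]
      | succ k => simp

-- snapshot-map form of A's interior loop
def U (t : List String) (m : Nat) : List String :=
  (List.range t.length).map (fun j =>
    if 1 ≤ j ∧ j ≤ m ∧ t.getD j "" ≠ "O" ∧ t.getD (j-1) "" = "O" ∧ t.getD (j+1) "" = "O"
    then "O" else t.getD j "")

theorem length_U (t : List String) (m : Nat) : (U t m).length = t.length := by
  simp [U]

theorem getElem_U (t : List String) (m j : Nat) (hj : j < (U t m).length) :
    (U t m)[j] =
      if 1 ≤ j ∧ j ≤ m ∧ t.getD j "" ≠ "O" ∧ t.getD (j-1) "" = "O" ∧ t.getD (j+1) "" = "O"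
      then "O" else t.getD j "" := by
  unfold U at hj ⊢
  simp only [List.getElem_map, List.getElem_range]

theorem getD_U (t : List String) (m j : Nat) (hj : j < t.length) :
    (U t m).getD j "" =
      if 1 ≤ j ∧ j ≤ m ∧ t.getD j "" ≠ "O" ∧ t.getD (j-1) "" = "O" ∧ t.getD (j+1) "" = "O"
      then "O" else t.getD j "" := by
  unfold U
  rw [List.getD_eq_getElem _ _ (by simpa using hj)]
  simp

theorem U_zero (t : List String) : U t 0 = t := by
  apply List.ext_getElem (by simp [U])
  intro j h1 h2
  simp only [U, List.getElem_map, List.getElem_range]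
  rw [if_neg (by omega), List.getD_eq_getElem _ _ h2]

theorem U_succ_of_not (t : List String) (m : Nat)
    (h : ¬ (t.getD (m+1) "" ≠ "O" ∧ t.getD m "" = "O" ∧ t.getD (m+2) "" = "O")) :
    U t (m+1) = U t m := by
  unfold U
  apply List.map_congr_left
  intro j hj
  rcases Nat.lt_or_ge j (m+1) with hlt | hge
  · exact if_congr ⟨fun ⟨a, b, c⟩ => ⟨a, by omega, c⟩, fun ⟨a, b, c⟩ => ⟨a, by omega, c⟩⟩ rfl rfl
  rcases Nat.lt_or_ge (m+1) j with hlt | hge'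
  · rw [if_neg (by omega), if_neg (by omega)]
  have hj : j = m + 1 := by omega
  subst hj
  rw [if_neg ?_, if_neg (by omega)]
  rintro ⟨-, -, h3, h4, h5⟩
  exact h ⟨h3, by simpa using h4, by simpa using h5⟩

theorem aloop_eq_U (t : List String) (m : Nat) (h : m + 2 ≤ t.length) :
    (List.range' 1 m).foldl
      (fun t i =>
        if t.getD i "" ≠ "O" ∧ t.getD (i - 1) "" = "O" ∧ t.getD (i + 1) "" = "O"
        then t.set i "O" else t) t = U t m := by
  induction m with
  | zero => simpa using (U_zero t).symm
  | succ m ih =>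
    rw [List.range'_concat, List.foldl_concat, ih (by omega)]
    have h1m : 1 + 1 * m = m + 1 := by omega
    rw [h1m]
    have ha : (U t m).getD (m+1) "" = t.getD (m+1) "" := by
      rw [getD_U t m (m+1) (by omega), if_neg (by omega)]
    have hc : (U t m).getD (m+1+1) "" = t.getD (m+2) "" := by
      rw [show m+1+1 = m+2 from rfl, getD_U t m (m+2) (by omega), if_neg (by omega)]
    by_cases hC1 : t.getD (m+1) "" = "O"
    · rw [if_neg (fun hcon => hcon.1 (ha.trans hC1)), U_succ_of_not t m (fun hcon => hcon.1 hC1)]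
    · have hb : (U t m).getD (m+1-1) "" = t.getD m "" := by
        rw [show m+1-1 = m from rfl, getD_U t m m (by omega),
          if_neg (by rintro ⟨-, -, -, -, h5⟩; exact hC1 h5)]
      by_cases hS : t.getD m "" = "O" ∧ t.getD (m+2) "" = "O"
      · rw [if_pos ⟨fun e => hC1 (ha.symm.trans e), hb.trans hS.1, hc.trans hS.2⟩]
        apply List.ext_getElem (by simp [U])
        intro j h1 h2
        rw [List.getElem_set, getElem_U t m j (by simp [length_U] at h1 ⊢; omega),
          getElem_U t (m+1) j h2]
        rcases eq_or_ne (m+1) j with hj | hj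
        · subst hj
          rw [if_pos rfl, if_pos ⟨by omega, by omega, hC1, by simpa using hS.1, hS.2⟩]
        · rw [if_neg hj]
          exact (if_congr ⟨fun ⟨a, b, c⟩ => ⟨a, by omega, c⟩,
            fun ⟨a, b, c⟩ => ⟨a, by omega, c⟩⟩ rfl rfl).symm
      · rw [if_neg (by rintro ⟨-, h2, h3⟩; exact hS ⟨hb.symm.trans h2, hc.symm.trans h3⟩),
          U_succ_of_not t m (by rintro ⟨-, h2, h3⟩; exact hS ⟨h2, h3⟩)]

theorem getD_aGuard1_O (t : List String) (j : Nat) (h : t.getD j "" = "O") :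
    (aGuard1 t).getD j "" = "O" := by
  rcases eq_or_ne j 0 with rfl | hj
  · unfold aGuard1
    split
    · rename_i hc; exact absurd h hc.1
    · exact h
  · rw [getD_aGuard1_ne t j hj]; exact h

theorem getD_aGuard2_O (t : List String) (j : Nat) (h : t.getD j "" = "O") :
    (aGuard2 t).getD j "" = "O" := by
  rcases eq_or_ne j (t.length - 1) with rfl | hj
  · unfold aGuard2
    split
    · rename_i hc; exact absurd h hc.1
    · exact h
  · rw [getD_aGuard2_ne t j hj]; exact h

-- ===== lemmas for B: fixSegs equals the pointwise snapshot rule =====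

theorem gRec_prev_irrel (p : String) (l : List String) (h : l.getD 0 "O" = "O") :
    gRec p l = gRec "O" l := by
  cases l with
  | nil => rfl
  | cons x t =>
    simp only [List.getD_cons_zero] at h
    subst h
    simp [gRec]

theorem gRec_O_prefix (p ys : List String) (h : ∀ a ∈ p, a = "O") :
    gRec "O" (p ++ ys) = p ++ gRec "O" ys := by
  induction p with
  | nil => rfl
  | cons o ps ih =>
    have ho : o = "O" := h o (by simp)
    subst ho
    simp only [List.cons_append, gRec]
    rw [if_neg (by simp), ih (fun a ha => h a (by simp [ha]))]

theorem gRec_nonO_run (r : List String) (prev : String) (ys : List String)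
    (hp : prev ≠ "O") (hr : ∀ a ∈ r, a ≠ "O") (hy : ys.getD 0 "O" = "O") :
    gRec prev (r ++ ys) = r ++ gRec "O" ys := by
  induction r generalizing prev with
  | nil => simpa using gRec_prev_irrel prev ys hy
  | cons a rs ih =>
    simp only [List.cons_append, gRec]
    rw [if_neg (by rintro ⟨-, h2, -⟩; exact hp h2)]
    rw [ih a (hr a (by simp)) (fun b hb => hr b (by simp [hb]))]

theorem countRun_take (key : Bool) (l : List String) :
    ∀ a ∈ l.take (countRun key l), (a == "O") = key := by
  induction l with
  | nil => simp [countRun]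
  | cons y ys ih =>
    by_cases h : (y == "O") = key
    · have hcr : countRun key (y :: ys) = 1 + countRun key ys := by simp [countRun, h]
      rw [hcr, Nat.add_comm, List.take_succ_cons]
      intro a ha
      rcases List.mem_cons.mp ha with rfl | ha
      · exact h
      · exact ih a ha
    · simp [countRun, h]

theorem countRun_drop (key : Bool) (l : List String) :
    l.drop (countRun key l) = [] ∨
      ∃ h t, l.drop (countRun key l) = h :: t ∧ (h == "O") = !key := by
  induction l with
  | nil => left; rfl
  | cons y ys ih =>
    by_cases h : (y == "O") = key
    · have hcr : countRun key (y :: ys) = 1 + countRun key ys := by simp [countRun, h]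
      rw [hcr, Nat.add_comm, List.drop_succ_cons]
      exact ih
    · right
      exact ⟨y, ys, by simp [countRun, h], by cases key <;> simp_all⟩

theorem fixSegs_eq_gRec : ∀ (n : Nat) (xs : List String), xs.length ≤ n →
    fixSegs xs = gRec "O" xs := by
  intro n
  induction n with
  | zero =>
    intro xs h
    rw [List.length_eq_zero_iff.mp (Nat.le_zero.mp h)]
    simp [fixSegs, gRec]
  | succ n ih =>
    intro xs hlen
    cases xs with
    | nil => simp [fixSegs, gRec]
    | cons x rest =>
      rw [fixSegs]
      have hdroplen : (rest.drop (countRun (x == "O") rest)).length ≤ n := by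
        simp only [List.length_cons] at hlen
        have := List.length_drop (l := rest) (i := countRun (x == "O") rest)
        omega
      rw [ih _ hdroplen]
      by_cases hx : x = "O"
      · subst hx
        have hkey : ("O" == "O") = true := by simp
        rw [if_neg (by simp)]
        have hall : ∀ a ∈ ("O" :: rest.take (countRun (("O":String) == "O") rest)), a = "O" := by
          intro a ha
          rcases List.mem_cons.mp ha with rfl | ha
          · rfl
          · have := countRun_take (("O":String) == "O") rest a ha
            rw [hkey] at this
            exact beq_iff_eq.mp (by simpa [hkey] using this)
        have := gRec_O_prefix ("O" :: rest.take (countRun (("O":String) == "O") rest))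
          (rest.drop (countRun (("O":String) == "O") rest)) hall
        rw [List.cons_append, List.take_append_drop] at this
        rw [this]
      · have hkey : (x == "O") = false := by simpa using hx
        have hdO : (rest.drop (countRun (x == "O") rest)).getD 0 "O" = "O" := by
          rcases countRun_drop (x == "O") rest with he | ⟨h, t, heq, hh⟩
          · rw [he]; rfl
          · rw [heq]
            simp only [List.getD_cons_zero]
            rw [hkey] at hh
            exact beq_iff_eq.mp (by simpa using hh)
        by_cases hc : countRun (x == "O") rest = 0
        · rw [hc] at hdO ⊢
          rw [if_pos ⟨rfl, hx⟩]
          simp only [List.drop_zero] at hdO ⊢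
          cases rest with
          | nil => simp [gRec, hx]
          | cons y ys =>
            simp only [List.getD_cons_zero] at hdO
            subst hdO
            simp [gRec, hx]
        · rw [if_neg (by rintro ⟨h1, -⟩; omega)]
          have htake : ∀ a ∈ rest.take (countRun (x == "O") rest), a ≠ "O" := by
            intro a ha hcon
            have := countRun_take (x == "O") rest a ha
            rw [hkey, hcon] at this
            simp at this
          have hmain := gRec_nonO_run (rest.take (countRun (x == "O") rest)) x
            (rest.drop (countRun (x == "O") rest)) hx htake hdO
          rw [List.take_append_drop] at hmain
          cases rest with
          | nil => exact absurd rfl hc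
          | cons y ys =>
            have hy : (y == "O") = false := by
              by_cases h : (y == "O") = (x == "O")
              · rw [hkey] at h; exact h
              · exfalso; apply hc; simp [countRun, h]
            conv_rhs => rw [gRec]
            rw [if_neg (by
              rintro ⟨-, -, h3⟩
              simp only [List.getD_cons_zero] at h3
              rw [h3] at hy
              simp at hy)]
            rw [hmain, List.cons_append]


-- ===== VERDICT (by name: the statement is the Claim_ definition above) =====
theorem clear_single_tag_sent_spec : Claim_equal_clear_single_tag_sent := by
  intro tag _
  unfold Spec_clear_single_tag_sent clear_single_tag_sent clear_single_tag_sent_alt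
  by_cases h0 : tag.length = 0
  · rw [if_pos h0, if_pos h0]
  rw [if_neg h0, if_neg h0]
  by_cases h1 : tag.length = 1
  · rw [if_pos h1, if_pos h1]
  rw [if_neg h1, if_neg h1]
  have hn : 2 ≤ tag.length := by omega
  rw [fixSegs_eq_gRec tag.length tag le_rfl]
  have hlen2 : (aGuard2 (aGuard1 tag)).length = tag.length := by
    rw [length_aGuard2, length_aGuard1]
  rw [aloop_eq_U _ _ (by omega)]
  apply List.ext_getElem (by rw [length_U, hlen2, gRec_length])
  intro j h1' h2'
  have hj : j < tag.length := by rwa [length_U, hlen2] at h1'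
  rw [getElem_U _ _ _ h1', ← List.getD_eq_getElem (gRec "O" tag) "" h2',
    getD_gRec tag "O" j hj]
  rcases eq_or_ne j 0 with rfl | hj0
  · -- first position
    rw [if_neg (by rintro ⟨h, -⟩; omega)]
    rw [getD_aGuard2_ne _ 0 (by rw [length_aGuard1]; omega)]
    rw [getD_aGuard1_zero tag (by omega)]
    rw [show (if (0:Nat) = 0 then "O" else tag.getD (0-1) "") = "O" from if_pos rfl]
    rw [getD_irrel tag 1 "O" "" (by omega)]
    exact if_congr ⟨fun ⟨a, b⟩ => ⟨a, rfl, b⟩, fun ⟨a, _, c⟩ => ⟨a, c⟩⟩ rfl rfl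
  rcases eq_or_ne j (tag.length - 1) with rfl | hjl
  · -- last position
    rw [if_neg (by rintro ⟨-, h, -⟩; omega)]
    have hlast := getD_aGuard2_last (aGuard1 tag) (by rw [length_aGuard1]; omega)
    rw [length_aGuard1] at hlast
    rw [hlast, getD_aGuard1_ne tag (tag.length - 1) (by omega)]
    rw [List.getD_eq_default tag "O" (n := tag.length - 1 + 1) (by omega)]
    rw [show (if tag.length - 1 = 0 then "O" else tag.getD (tag.length - 1 - 1) "")
        = tag.getD (tag.length - 1 - 1) "" from if_neg (by omega)]
    rw [show tag.length - 1 - 1 = tag.length - 2 from by omega]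
    rcases Nat.lt_or_ge 2 tag.length with h3 | h3
    · rw [getD_aGuard1_ne tag (tag.length - 2) (by omega)]
      exact if_congr ⟨fun ⟨a, b⟩ => ⟨a, b, rfl⟩, fun ⟨a, b, _⟩ => ⟨a, b⟩⟩ rfl rfl
    · rw [show tag.length - 2 = 0 from by omega, getD_aGuard1_zero tag (by omega)]
      by_cases hg1 : tag.getD 0 "" ≠ "O" ∧ tag.getD 1 "" = "O"
      · rw [if_pos hg1, show tag.length - 1 = 1 from by omega]
        rw [if_neg (fun hc => hc.1 hg1.2), if_neg (fun hc => hc.1 hg1.2)]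
      · rw [if_neg hg1]
        exact if_congr ⟨fun ⟨a, b⟩ => ⟨a, b, rfl⟩, fun ⟨a, b, _⟩ => ⟨a, b⟩⟩ rfl rfl
  · -- interior position: 1 ≤ j ≤ tag.length - 2
    have hj1 : 1 ≤ j := by omega
    have hj2 : j ≤ tag.length - 2 := by omega
    rw [show (if j = 0 then "O" else tag.getD (j-1) "") = tag.getD (j-1) "" from if_neg hj0]
    rw [getD_irrel tag (j+1) "O" "" (by omega)]
    by_cases hOj : tag.getD j "" = "O"
    · have ht2j : (aGuard2 (aGuard1 tag)).getD j "" = "O" :=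
        getD_aGuard2_O _ _ (getD_aGuard1_O _ _ hOj)
      rw [if_neg (fun hc => hc.2.2.1 ht2j), if_neg (fun hc => hc.1 hOj), ht2j, hOj]
    · have et : (aGuard2 (aGuard1 tag)).getD j "" = tag.getD j "" := by
        rw [getD_aGuard2_ne _ j (by rw [length_aGuard1]; omega),
          getD_aGuard1_ne _ j (by omega)]
      have em : (aGuard2 (aGuard1 tag)).getD (j-1) "" = tag.getD (j-1) "" := by
        rw [getD_aGuard2_ne _ (j-1) (by rw [length_aGuard1]; omega)]
        rcases eq_or_ne j 1 with rfl | hj1'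
        · rw [show (1:Nat) - 1 = 0 from rfl, getD_aGuard1_zero tag (by omega),
            if_neg (fun hc => hOj hc.2)]
        · exact getD_aGuard1_ne _ _ (by omega)
      have ep : (aGuard2 (aGuard1 tag)).getD (j+1) "" = tag.getD (j+1) "" := by
        by_cases hjn : j + 1 = tag.length - 1
        · have ht1j : (aGuard1 tag).getD j "" = tag.getD j "" :=
            getD_aGuard1_ne _ j (by omega)
          have hlast := getD_aGuard2_last (aGuard1 tag) (by rw [length_aGuard1]; omega)
          rw [length_aGuard1] at hlast
          rw [hjn, hlast, if_neg (fun hc => hOj (by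
            have := hc.2
            rw [show tag.length - 2 = j from by omega, ht1j] at this
            exact this))]
          rw [getD_aGuard1_ne tag (tag.length - 1) (by omega)]
        · rw [getD_aGuard2_ne _ (j+1) (by rw [length_aGuard1]; omega),
            getD_aGuard1_ne _ (j+1) (by omega)]
      rw [et, em, ep]
      exact if_congr ⟨fun ⟨_, _, c⟩ => c, fun c => ⟨hj1, by omega, c⟩⟩ rfl rfl
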